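-- pv_equiv track=rewrite | github.com/brette-0/nesbrette | archive/slow/math/fast_multiply_16/bitsumming/fast_multiply_16.py | bit_sum_8
-- ===== SOURCE A (Python) =====
-- def bit_sum_8(num):
--     val = num
--     a = 2
--     while val:
--         a += 2
--         if (val) & 1:
--             a += 5
--         else:
--             a += 3
--         val >>= 1
--
--     a += 11 if num & 0x80 else 10
--     return a
-- ===== SOURCE B (Python) =====
-- def bit_sum_8(num):
--     # closed form: each bit position contributes 5, each set bit 2 more
--     return 2 + 5 * num.bit_length() + 2 * bin(num).count('1') + (11 if num & 0x80 else 10)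
-- ===== Notes on version B (the rewrite author's own statement) =====
-- stated objective: simpler
-- what changed: Replaced the per-bit while loop with a closed form from bit_length() and popcount (each bit position contributes 5, each set bit 2 more, plus the base and bit-7 constant).
-- outside the precondition, e.g. on bit_sum_8(-1): A does not finish within the time limit, B returns 20
import Mathlib
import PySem

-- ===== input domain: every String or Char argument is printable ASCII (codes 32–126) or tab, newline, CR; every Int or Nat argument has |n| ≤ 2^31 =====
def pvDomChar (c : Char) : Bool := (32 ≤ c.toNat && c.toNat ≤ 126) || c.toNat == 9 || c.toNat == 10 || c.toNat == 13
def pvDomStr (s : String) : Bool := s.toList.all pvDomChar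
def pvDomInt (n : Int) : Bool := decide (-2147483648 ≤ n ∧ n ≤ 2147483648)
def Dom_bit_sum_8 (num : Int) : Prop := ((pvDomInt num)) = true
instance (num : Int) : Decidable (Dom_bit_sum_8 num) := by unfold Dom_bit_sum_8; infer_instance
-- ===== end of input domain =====

-- B replaces A's per-bit while loop with a closed form (5 per bit position, 2 more per set bit): simpler, no iteration.

-- ===== PORT A =====
-- A's while loop, on the Int state val itself ('val >>= 1' = floor-shift = floordiv by 2,
-- 'val & 1' = PySem.Int.band val 1); fuel num.toNat + 1 suffices for every num ≥ 0 (Pre_),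
-- the fuel-exhausted branch is reached only on negative num, where the Python loop never terminates.
def bitSumLoopA (fuel : Nat) (val : Int) (a : Int) : Int :=
  match fuel with
  | 0 => a
  | fuel + 1 =>
    if val = 0 then a
    else
      bitSumLoopA fuel (PySem.Int.floordiv val 2)
        (a + 2 + (if PySem.Int.band val 1 ≠ 0 then 5 else 3))

def bit_sum_8 (num : Int) : Int :=
  bitSumLoopA (num.toNat + 1) num 2 + (if PySem.Int.band num 0x80 ≠ 0 then 11 else 10)

-- ===== PORT B =====
-- num.bit_length() (for num ≥ 0)
def pyBitLength (n : Nat) : Int :=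
  if n = 0 then 0 else pyBitLength (n / 2) + 1
termination_by n
decreasing_by exact Nat.div_lt_self (Nat.pos_of_ne_zero (by assumption)) (by omega)

-- bin(num).count('1') (for num ≥ 0)
def pyPopCount (n : Nat) : Int :=
  if n = 0 then 0 else pyPopCount (n / 2) + ((n % 2 : Nat) : Int)
termination_by n
decreasing_by exact Nat.div_lt_self (Nat.pos_of_ne_zero (by assumption)) (by omega)

def bit_sum_8_alt (num : Int) : Int :=
  2 + 5 * pyBitLength num.toNat + 2 * pyPopCount num.toNat
    + (if PySem.Int.band num 0x80 ≠ 0 then 11 else 10)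

-- ===== PRECONDITION & SPEC =====
-- Pre_ excludes negative num: there A's loop never terminates (arithmetic right shift of a negative never reaches 0)
def Pre_bit_sum_8 (num : Int) : Prop := 0 ≤ num
instance (num : Int) : Decidable (Pre_bit_sum_8 num) := by unfold Pre_bit_sum_8; infer_instance
def pvWitness_bit_sum_8 : Int := 5

def Spec_bit_sum_8 (num : Int) (out : Int) : Prop := out = bit_sum_8_alt num
instance (num : Int) (out : Int) : Decidable (Spec_bit_sum_8 num out) := by unfold Spec_bit_sum_8; infer_instance

-- ===== CLAIM (what is proved, stated in full; the proofs are below) =====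
def Claim_equal_bit_sum_8 : Prop := ∀ (num : Int), Dom_bit_sum_8 num → Pre_bit_sum_8 num → Spec_bit_sum_8 num (bit_sum_8 num)

-- ===== LEMMAS AND PROOFS =====
theorem bitSumLoopA_closed (fuel : Nat) : ∀ (v : Nat), v < fuel → ∀ a : Int,
    bitSumLoopA fuel (v : Int) a = a + 5 * pyBitLength v + 2 * pyPopCount v := by
  induction fuel with
  | zero => intro v hv; omega
  | succ f ih =>
    intro v hv a
    by_cases h : v = 0
    · subst h; simp [bitSumLoopA, pyBitLength, pyPopCount]
    · rw [bitSumLoopA]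
      have hvz : (v : Int) ≠ 0 := by exact_mod_cast h
      simp only [hvz, if_false]
      have hb : PySem.Int.band (v : Int) 1 = ((v &&& 1 : Nat) : Int) := by
        exact_mod_cast PySem.Int.band_natCast v 1
      have hfd : PySem.Int.floordiv (v : Int) 2 = ((v / 2 : Nat) : Int) := by
        exact_mod_cast PySem.Int.floordiv_natCast v 2
      rw [hb, hfd, ih (v / 2) (by omega)]
      have hBL : pyBitLength v = pyBitLength (v / 2) + 1 := by
        rw [pyBitLength]; simp [h]
      have hPC : pyPopCount v = pyPopCount (v / 2) + ((v % 2 : Nat) : Int) := by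
        rw [pyPopCount]; simp [h]
      rw [hBL, hPC]
      have hm : v &&& 1 = v % 2 := Nat.and_one_is_mod v
      rcases Nat.mod_two_eq_zero_or_one v with h2 | h2 <;>
        simp [hm, h2] <;> ring

theorem bit_sum_8_spec : Claim_equal_bit_sum_8 := by
  intro num _ hpre
  unfold Spec_bit_sum_8 bit_sum_8 bit_sum_8_alt
  have h : (num.toNat : Int) = num := Int.toNat_of_nonneg hpre
  rw [← h]
  simp only [Int.toNat_natCast]
  rw [bitSumLoopA_closed (num.toNat + 1) num.toNat (by omega)]
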